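-- pv_equiv track=rewrite | github.com/eordano/ctoc | tokenizer.py | optimal_tokenize
-- ===== SOURCE A (Python) =====
-- def optimal_tokenize(text: str, vocab: set[str]) -> list[str]:
--     """
--     Find the minimum-token segmentation using dynamic programming.
--
--     Unlike greedy longest-match, this finds the globally optimal split
--     that minimizes the total number of tokens. Much closer to BPE output.
--
--     Time: O(n * max_token_len), Space: O(n)
--     """
--     if not text:
--         return []
--
--     n = len(text)
--     max_len = max(len(t) for t in vocab) if vocab else 0
--
--     # dp[i] = minimum tokens to cover text[0:i]
--     INF = float("inf")
--     dp = [INF] * (n + 1)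
--     dp[0] = 0
--     parent = [0] * (n + 1)  # parent[i] = start position of the token ending at i
--
--     for i in range(1, n + 1):
--         # Try every possible token ending at position i
--         for length in range(1, min(max_len, i) + 1):
--             j = i - length
--             candidate = text[j:i]
--             if candidate in vocab and dp[j] + 1 < dp[i]:
--                 dp[i] = dp[j] + 1
--                 parent[i] = j
--
--         # Fallback: single character (always possible)
--         if dp[i - 1] + 1 < dp[i]:
--             dp[i] = dp[i - 1] + 1
--             parent[i] = i - 1
--
--     # Reconstruct tokens
--     tokens = []
--     pos = n
--     while pos > 0:
--         start = parent[pos]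
--         tokens.append(text[start:pos])
--         pos = start
--
--     tokens.reverse()
--     return tokens
-- ===== SOURCE B (Python) =====
-- def optimal_tokenize(text: str, vocab: set[str]) -> list[str]:
--     # Same DP objective, different machinery: a set of all non-empty token suffixes lets
--     # the inner scan grow the candidate string incrementally and stop as soon as it can no
--     # longer extend to a vocab token; the DP stores the segmentations themselves as shared
--     # cons-cells, so there is no parent array and no index-chasing reconstruction pass.
--     # (Different traversal/data structures, same asymptotic cost.)
--     suffixes = {t[j:] for t in vocab for j in range(len(t))}
--     n = len(text)
--     best = [(0, None)]  # best[i] = (token count, cons-list of tokens, last first) for text[:i]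
--     for i in range(1, n + 1):
--         choice = None  # best vocab-token candidate ending at i: (count, start)
--         cand = ""
--         for length in range(1, i + 1):
--             cand = text[i - length] + cand
--             if cand not in suffixes:
--                 break
--             if cand in vocab:
--                 c = best[i - length][0] + 1
--                 if choice is None or c < choice[0]:
--                     choice = (c, i - length)
--         fc = best[i - 1][0] + 1
--         if choice is None or fc < choice[0]:
--             choice = (fc, i - 1)
--         c, j = choice
--         best.append((c, (text[j:i], best[j][1])))
--     out = []
--     node = best[n][1]
--     while node is not None:
--         out.append(node[0])
--         node = node[1]
--     out.reverse()
--     return out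
-- ===== Notes on version B (the rewrite author's own statement) =====
-- stated objective: alternative
-- what changed: B precomputes the set of all non-empty token suffixes so the inner scan grows the candidate incrementally and breaks as soon as it cannot extend to a vocab token, and the DP stores the segmentations themselves as shared cons-cells, eliminating A's per-length string slicing, parent array and reconstruction pass; it trades A's slicing for incremental candidate building with early termination at the same asymptotic cost.
import Mathlib
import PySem

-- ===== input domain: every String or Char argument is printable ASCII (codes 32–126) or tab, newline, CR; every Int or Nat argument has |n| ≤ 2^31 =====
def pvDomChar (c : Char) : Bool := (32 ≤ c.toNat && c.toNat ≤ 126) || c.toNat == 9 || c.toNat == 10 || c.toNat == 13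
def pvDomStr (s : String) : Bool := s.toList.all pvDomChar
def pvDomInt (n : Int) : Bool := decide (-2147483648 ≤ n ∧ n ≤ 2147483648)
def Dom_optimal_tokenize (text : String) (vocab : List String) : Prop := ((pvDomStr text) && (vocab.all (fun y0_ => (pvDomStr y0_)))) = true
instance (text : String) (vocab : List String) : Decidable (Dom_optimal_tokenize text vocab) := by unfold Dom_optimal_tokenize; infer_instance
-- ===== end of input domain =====

-- B replaces A's per-length slicing and parent-array reconstruction by a suffix-set-pruned
-- incremental scan and a DP that stores the segmentations themselves (cons-cells); same
-- asymptotic cost, equal return value proved below.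

-- ===== PORT A =====
-- Option Int models A's float('inf') sentinel: none = INF (it is only compared and incremented)
def otInfLt : Option Int → Option Int → Bool
  | some a, some b => decide (a < b)
  | some _, none => true
  | none, _ => false

def otInfAdd1 : Option Int → Option Int
  | some a => some (a + 1)
  | none => none

-- max(len(t) for t in vocab) if vocab else 0  (max over a set: order-independent)
def otMaxLen (vocabL : List (List Char)) : Nat :=
  if vocabL = [] then 0 else (PySem.List.max? (vocabL.map List.length) (fun x => x)).getD 0

-- inner loop of A: try every token length L ∈ Ls ending at i, updating dp[i], parent[i] in place
-- (indices are Nat: every index A uses is ≥ 0 and in range; text[j:i] = (drop j).take (i-j))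
def otA_inner (cs : List Char) (vocabL : List (List Char)) (i : Nat)
    (Ls : List Nat) (st : List (Option Int) × List Nat) : List (Option Int) × List Nat :=
  Ls.foldl (fun st L =>
    let j := i - L
    let candidate := (cs.drop j).take (i - j)
    if vocabL.contains candidate && otInfLt (otInfAdd1 (st.1.getD j none)) (st.1.getD i none) then
      (st.1.set i (otInfAdd1 (st.1.getD j none)), st.2.set i j)
    else st) st

-- one outer iteration of A: the inner loop, then the single-character fallback
def otA_step (cs : List Char) (vocabL : List (List Char))
    (st : List (Option Int) × List Nat) (i : Nat) : List (Option Int) × List Nat :=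
  let st1 := otA_inner cs vocabL i (List.range' 1 (min (otMaxLen vocabL) i)) st
  if otInfLt (otInfAdd1 (st1.1.getD (i-1) none)) (st1.1.getD i none) then
    (st1.1.set i (otInfAdd1 (st1.1.getD (i-1) none)), st1.2.set i (i-1))
  else st1

-- A's reconstruction while-loop; fuel n+1 > pos and parent[pos] < pos, so fuel never runs out
def otA_build (cs : List Char) (parent : List Nat) : Nat → Nat → List (List Char) → List (List Char)
  | 0, _, tokens => tokens
  | fuel+1, pos, tokens =>
    if 0 < pos then
      let start := parent.getD pos 0
      otA_build cs parent fuel start (tokens ++ [(cs.drop start).take (pos - start)])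
    else tokens

def optimal_tokenize (text : String) (vocab : List String) : List String :=
  let cs := text.toList
  if cs = [] then []
  else
    let n := cs.length
    let vocabL := vocab.map String.toList
    let st0 : List (Option Int) × List Nat := (some 0 :: List.replicate n none, List.replicate (n+1) 0)
    let st := (List.range' 1 n).foldl (otA_step cs vocabL) st0
    ((otA_build cs st.2 (n+1) n []).reverse).map String.ofList

-- ===== PORT B =====
-- {t[j:] for t in vocab for j in range(len(t))}
def otSuffixes (vocabL : List (List Char)) : PySem.Set (List Char) :=
  PySem.Set.ofList (vocabL.flatMap (fun t => (List.range t.length).map (fun j => t.drop j)))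

-- B's inner scan: grow the candidate one character at a time (text[i-L] prepended; the index
-- is always in range, so getD is exact), break as soon as it is no suffix of any vocab token
def otB_scan (cs : List Char) (vocabL : List (List Char)) (suffixes : PySem.Set (List Char))
    (best : List (Int × List (List Char))) (i : Nat) :
    List Nat → List Char → Option (Int × Nat) → Option (Int × Nat)
  | [], _, choice => choice
  | L :: rest, cand, choice =>
    let cand' := cs.getD (i - L) 'a' :: cand
    if suffixes.contains cand' then
      let choice' :=
        if vocabL.contains cand' then
          let c := (best.getD (i - L) (0, [])).1 + 1
          match choice with
          | none => some (c, i - L)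
          | some p => if c < p.1 then some (c, i - L) else some p
        else choice
      otB_scan cs vocabL suffixes best i rest cand' choice'
    else choice

-- one outer iteration of B: scan, fallback, then append (count, token cons-cell)
def otB_step (cs : List Char) (vocabL : List (List Char)) (suffixes : PySem.Set (List Char))
    (best : List (Int × List (List Char))) (i : Nat) : List (Int × List (List Char)) :=
  let choice := otB_scan cs vocabL suffixes best i (List.range' 1 i) [] none
  let fc := (best.getD (i - 1) (0, [])).1 + 1
  let cj : Int × Nat := match choice with
    | none => (fc, i - 1)
    | some p => if fc < p.1 then (fc, i - 1) else p
  best ++ [(cj.1, ((cs.drop cj.2).take (i - cj.2)) :: (best.getD cj.2 (0, [])).2)]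

def optimal_tokenize_alt (text : String) (vocab : List String) : List String :=
  let cs := text.toList
  let vocabL := vocab.map String.toList
  let n := cs.length
  let best := (List.range' 1 n).foldl (otB_step cs vocabL (otSuffixes vocabL))
    [((0 : Int), ([] : List (List Char)))]
  -- unwinding the cons-cell chain and reversing is List.reverse
  ((best.getD n (0, [])).2).reverse.map String.ofList

-- ===== PRECONDITION & SPEC =====
def Spec_optimal_tokenize (text : String) (vocab : List String) (out : List String) : Prop := out = optimal_tokenize_alt text vocab
instance (text : String) (vocab : List String) (out : List String) : Decidable (Spec_optimal_tokenize text vocab out) := by unfold Spec_optimal_tokenize; infer_instance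

-- ===== CLAIM (what is proved, stated in full; the proofs are below) =====
def Claim_equal_optimal_tokenize : Prop := ∀ (text : String) (vocab : List String), Dom_optimal_tokenize text vocab → Spec_optimal_tokenize text vocab (optimal_tokenize text vocab)

-- ===== LEMMAS AND PROOFS =====

theorem getD_set_ne' {α : Type} (l : List α) (i j : Nat) (a d : α) (h : j ≠ i) :
    (l.set i a).getD j d = l.getD j d := by
  simp [List.getD_eq_getElem?_getD, List.getElem?_set_ne (Ne.symm h)]

theorem getD_set_self' {α : Type} (l : List α) (i : Nat) (a d : α) (h : i < l.length) :
    (l.set i a).getD i d = a := by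
  simp [List.getD_eq_getElem?_getD, List.getElem?_set_self h]

theorem getD_concat_length' {α : Type} (l : List α) (a d : α) :
    (l ++ [a]).getD l.length d = a := by
  simp [List.getD_eq_getElem?_getD]

theorem set_getD_self' {α : Type} (l : List α) (i : Nat) (d : α) (h : i < l.length) :
    l.set i (l.getD i d) = l := by
  simp [List.getD_eq_getElem?_getD, List.getElem?_eq_getElem h, List.set_getElem_self]

theorem getD_append_left' {α : Type} (l l2 : List α) (i : Nat) (d : α) (h : i < l.length) :
    (l ++ l2).getD i d = l.getD i d := by
  simp [List.getD_eq_getElem?_getD, List.getElem?_append_left h]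

-- pure accumulator form of A's inner loop (reads dp, carries only (dp[i], parent[i]))
def otAccA (cs : List Char) (vocabL : List (List Char)) (dp : List (Option Int)) (i : Nat)
    (Ls : List Nat) (st : Option Int × Nat) : Option Int × Nat :=
  Ls.foldl (fun st L =>
    let j := i - L
    let candidate := (cs.drop j).take (i - j)
    if vocabL.contains candidate && otInfLt (otInfAdd1 (dp.getD j none)) st.1 then
      (otInfAdd1 (dp.getD j none), j)
    else st) st

-- B's Option choice viewed as A's (dp[i], parent[i]) pair
def otToSt (p0 : Nat) : Option (Int × Nat) → Option Int × Nat
  | none => (none, p0)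
  | some p => (some p.1, p.2)

theorem otA_inner_set (cs : List Char) (vocabL : List (List Char)) (i : Nat) (hi : 1 ≤ i)
    (Ls : List Nat) (hLs : ∀ L ∈ Ls, 1 ≤ L)
    (dp : List (Option Int)) (par : List Nat) (hdp : i < dp.length)
    (a : Option Int) (p : Nat) :
    otA_inner cs vocabL i Ls (dp.set i a, par.set i p) =
      (dp.set i (otAccA cs vocabL dp i Ls (a, p)).1,
       par.set i (otAccA cs vocabL dp i Ls (a, p)).2) := by
  induction Ls generalizing a p with
  | nil => simp [otA_inner, otAccA]
  | cons L rest ih =>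
    have hL : 1 ≤ L := hLs L (by simp)
    have hrest : ∀ L' ∈ rest, 1 ≤ L' := fun L' h => hLs L' (by simp [h])
    have hji : i - L ≠ i := by omega
    simp only [otA_inner, otAccA, List.foldl_cons] at *
    rw [getD_set_ne' _ _ _ _ _ hji, getD_set_self' _ _ _ _ hdp]
    by_cases hc : (vocabL.contains ((cs.drop (i - L)).take (i - (i - L)))
        && otInfLt (otInfAdd1 (dp.getD (i - L) none)) a) = true
    · simp only [hc, if_pos, List.set_set]
      exact ih hrest _ _
    · simp only [hc, Bool.false_eq_true, if_false]
      exact ih hrest _ _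

theorem otAccA_no_update (cs : List Char) (vocabL : List (List Char)) (dp : List (Option Int))
    (i : Nat) (Ls : List Nat) (st : Option Int × Nat)
    (h : ∀ L ∈ Ls, vocabL.contains ((cs.drop (i - L)).take (i - (i - L))) = false) :
    otAccA cs vocabL dp i Ls st = st := by
  induction Ls generalizing st with
  | nil => simp [otAccA]
  | cons L rest ih =>
    simp only [otAccA, List.foldl_cons, h L (by simp), Bool.false_and, Bool.false_eq_true,
      if_false]
    exact ih _ (fun L' hL' => h L' (List.mem_cons_of_mem _ hL'))

-- every element of the suffix pool has length ≤ maxLen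
theorem otSuffixes_len_le (vocabL : List (List Char)) (x : List Char)
    (hx : x ∈ otSuffixes vocabL) : x.length ≤ otMaxLen vocabL := by
  rw [otSuffixes, PySem.Set.mem_ofList, List.mem_flatMap] at hx
  obtain ⟨t, ht, hx⟩ := hx
  simp only [List.mem_map, List.mem_range] at hx
  obtain ⟨j, hj, rfl⟩ := hx
  have hne : vocabL ≠ [] := by rintro rfl; simp at ht
  have hmem : t.length ∈ vocabL.map List.length := List.mem_map_of_mem ht
  rcases hmax : PySem.List.max? (vocabL.map List.length) (fun x => x) with _ | m
  · rw [PySem.List.max?_eq_none_iff] at hmax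
    simp [hmax] at hmem
  · have := PySem.List.max?_isMax hmax _ hmem
    simp only [otMaxLen, if_neg hne, hmax, Option.getD_some]
    have : t.length ≤ m := this
    have hlen : (t.drop j).length = t.length - j := List.length_drop ..
    omega

-- a vocab token's proper drop is in the suffix pool
theorem otSuffixes_mem_drop (vocabL : List (List Char)) (t : List Char) (ht : t ∈ vocabL)
    (j : Nat) (hj : j < t.length) : t.drop j ∈ otSuffixes vocabL := by
  rw [otSuffixes, PySem.Set.mem_ofList, List.mem_flatMap]
  exact ⟨t, ht, by simp only [List.mem_map, List.mem_range]; exact ⟨j, hj, rfl⟩⟩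

theorem otAccA_cons (cs : List Char) (vocabL : List (List Char)) (dp : List (Option Int))
    (i L : Nat) (Ls : List Nat) (st : Option Int × Nat) :
    otAccA cs vocabL dp i (L :: Ls) st =
      otAccA cs vocabL dp i Ls
        (if vocabL.contains ((cs.drop (i - L)).take (i - (i - L)))
            && otInfLt (otInfAdd1 (dp.getD (i - L) none)) st.1
         then (otInfAdd1 (dp.getD (i - L) none), i - L) else st) := by
  simp only [otAccA, List.foldl_cons]

-- the pruning core: B's breaking scan computes A's full accumulator pass
theorem otB_scan_eq_accA (cs : List Char) (vocabL : List (List Char))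
    (best : List (Int × List (List Char))) (dp : List (Option Int)) (i : Nat) (p0 : Nat)
    (hi : 1 ≤ i) (hin : i ≤ cs.length)
    (hread : ∀ j, j < i → dp.getD j none = some ((best.getD j (0, [])).1)) :
    ∀ r t choice, r = i - t → t ≤ i →
      otAccA cs vocabL dp i (List.range' (t+1) (min (otMaxLen vocabL) i - t)) (otToSt p0 choice)
        = otToSt p0 (otB_scan cs vocabL (otSuffixes vocabL) best i
            (List.range' (t+1) r) ((cs.drop (i - t)).take t) choice) := by
  intro r
  induction r with
  | zero =>
    intro t choice hr ht
    have hti : t = i := by omega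
    subst hti
    have h0 : min (otMaxLen vocabL) t - t = 0 := by omega
    simp [h0, otAccA, otB_scan, List.range'_zero]
  | succ r ih =>
    intro t choice hr ht
    have htlt : t < i := by omega
    have hidx : i - (t+1) < cs.length := by omega
    have hcand : cs.getD (i - (t+1)) 'a' :: (cs.drop (i - t)).take t
        = (cs.drop (i - (t+1))).take (t+1) := by
      rw [List.drop_eq_getElem_cons hidx, show i - (t+1) + 1 = i - t from by omega,
        List.take_succ_cons, List.getD_eq_getElem?_getD, List.getElem?_eq_getElem hidx]
      rfl
    rw [List.range'_succ]
    simp only [otB_scan]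
    rw [hcand]
    by_cases hS : ((otSuffixes vocabL).contains ((cs.drop (i - (t+1))).take (t+1))) = true
    · have hmem : (cs.drop (i - (t+1))).take (t+1) ∈ otSuffixes vocabL := by
        simpa [PySem.Set.contains] using hS
      have hlen : ((cs.drop (i - (t+1))).take (t+1)).length = t + 1 := by
        simp only [List.length_take, List.length_drop]; omega
      have hml : t + 1 ≤ otMaxLen vocabL := by
        have := otSuffixes_len_le vocabL _ hmem; omega
      have hmin : min (otMaxLen vocabL) i - t = (min (otMaxLen vocabL) i - (t+1)) + 1 := by
        omega
      rw [hmin, List.range'_succ, otAccA_cons, if_pos hS,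
        show i - (i - (t+1)) = t + 1 from by omega, hread (i - (t+1)) (by omega)]
      set c : Int := (best.getD (i - (t+1)) (0, [])).1 with hc
      by_cases hv : List.take (t+1) (List.drop (i - (t+1)) cs) ∈ vocabL
      · have hvB : vocabL.contains (List.take (t+1) (List.drop (i - (t+1)) cs)) = true := by
          simpa [List.contains_iff_mem] using hv
        rw [if_pos hvB]
        cases choice with
        | none =>
          have hA : (vocabL.contains (List.take (t+1) (List.drop (i - (t+1)) cs))
              && otInfLt (otInfAdd1 (some c))
                   (otToSt p0 (none : Option (Int × Nat))).1) = true := by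
            simp [otToSt, otInfLt, otInfAdd1, hv]
          rw [if_pos hA]
          simpa [otToSt, otInfAdd1] using
            ih (t+1) (some (c + 1, i - (t+1)))
              (by omega) (by omega)
        | some p =>
          by_cases hlt : c + 1 < p.1
          · have hA : (vocabL.contains (List.take (t+1) (List.drop (i - (t+1)) cs))
                && otInfLt (otInfAdd1 (some c))
                     (otToSt p0 (some p)).1) = true := by
              simp [otToSt, otInfLt, otInfAdd1, hv, hlt]
            rw [if_pos hA]
            simpa [otToSt, otInfAdd1, hlt] using
              ih (t+1) (some (c + 1, i - (t+1)))
                (by omega) (by omega)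
          · have hA : ¬ ((vocabL.contains (List.take (t+1) (List.drop (i - (t+1)) cs))
                && otInfLt (otInfAdd1 (some c))
                     (otToSt p0 (some p)).1) = true) := by
              simp [otToSt, otInfLt, otInfAdd1, hlt]
            rw [if_neg hA]
            simpa [otToSt, otInfAdd1, hlt] using
              ih (t+1) (some p) (by omega) (by omega)
      · have hvB : vocabL.contains (List.take (t+1) (List.drop (i - (t+1)) cs)) = false :=
          Bool.eq_false_iff.mpr (fun hX => hv (List.contains_iff_mem.mp hX))
        rw [if_neg (by simp [hv] :
          ¬ ((vocabL.contains (List.take (t+1) (List.drop (i - (t+1)) cs))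
              && otInfLt (otInfAdd1 (some c))
                   (otToSt p0 choice).1) = true))]
        rw [if_neg (by simp [hv])]

        exact ih (t+1) choice (by omega) (by omega)
    · -- candidate cannot extend to a vocab token: B breaks, A's remaining passes are no-ops
      rw [otAccA_no_update cs vocabL dp i _ _ ?noup, if_neg hS]
      case noup =>
        intro L' hL'
        rw [List.mem_range'_1] at hL'
        have hL'i : L' ≤ i := by omega
        have hL'le : t + 1 ≤ L' := hL'.1
        by_contra hcon
        rw [Bool.not_eq_false, List.contains_iff_mem] at hcon
        have hiL' : i - (i - L') = L' := by omega
        rw [hiL'] at hcon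
        have hTlen : ((cs.drop (i - L')).take L').length = L' := by
          simp only [List.length_take, List.length_drop]; omega
        have hdropT : ((cs.drop (i - L')).take L').drop (L' - (t+1))
            = (cs.drop (i - (t+1))).take (t+1) := by
          rw [List.drop_take, List.drop_drop,
            show i - L' + (L' - (t+1)) = i - (t+1) from by omega,
            show L' - (L' - (t+1)) = t + 1 from by omega]
        have := otSuffixes_mem_drop vocabL _ hcon (L' - (t+1)) (by omega)
        rw [hdropT] at this
        exact hS (by simpa [PySem.Set.contains] using this)

-- any choice the scan returns points strictly left of i
theorem otB_scan_snd_lt (cs : List Char) (vocabL : List (List Char)) (S : PySem.Set (List Char))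
    (best : List (Int × List (List Char))) (i : Nat) (hi : 1 ≤ i) :
    ∀ Ls cand choice, (∀ L ∈ Ls, 1 ≤ L) → (∀ q, choice = some q → q.2 < i) →
      ∀ q, otB_scan cs vocabL S best i Ls cand choice = some q → q.2 < i := by
  intro Ls
  induction Ls with
  | nil => intro cand choice h hc q hq; exact hc q hq
  | cons L rest ih =>
    intro cand choice h hc q hq
    have hL : 1 ≤ L := h L (List.mem_cons_self ..)
    simp only [otB_scan] at hq
    by_cases hS : S.contains (cs.getD (i - L) 'a' :: cand) = true
    · rw [if_pos hS] at hq
      refine ih _ _ (fun L' hL' => h L' (List.mem_cons_of_mem _ hL')) ?_ q hq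
      intro q' hq'
      by_cases hv : vocabL.contains (cs.getD (i - L) 'a' :: cand) = true
      · rw [if_pos hv] at hq'
        cases choice with
        | none =>
          obtain ⟨q1, q2⟩ := q'
          simp at hq'; omega
        | some p =>
          obtain ⟨q1, q2⟩ := q'
          obtain ⟨p1, p2⟩ := p
          have hp2 : p2 < i := hc (p1, p2) rfl
          by_cases hpp : (best[i - L]?.getD (0, [])).1 + 1 < p1
          · simp [hpp] at hq'; omega
          · simp [hpp] at hq'; omega
      · rw [if_neg hv] at hq'; exact hc q' hq'
    · rw [if_neg hS] at hq; exact hc q hq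

-- one whole outer iteration agrees
theorem otStep_eq (cs : List Char) (vocabL : List (List Char)) (i : Nat)
    (dp : List (Option Int)) (par : List Nat) (best : List (Int × List (List Char)))
    (hi : 1 ≤ i) (hin : i ≤ cs.length)
    (hdp : i < dp.length) (hpar : i < par.length)
    (hnone : dp.getD i none = none)
    (hread : ∀ j, j < i → dp.getD j none = some ((best.getD j (0, [])).1)) :
    ∃ c j, j < i ∧
      otA_step cs vocabL (dp, par) i = (dp.set i (some c), par.set i j) ∧
      otB_step cs vocabL (otSuffixes vocabL) best i
        = best ++ [(c, ((cs.drop j).take (i - j)) :: (best.getD j (0, [])).2)] := by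
  have hLs : ∀ L ∈ List.range' 1 (min (otMaxLen vocabL) i), 1 ≤ L := by
    intro L hL; rw [List.mem_range'_1] at hL; omega
  have hinner : otA_inner cs vocabL i (List.range' 1 (min (otMaxLen vocabL) i)) (dp, par)
      = (dp.set i (otAccA cs vocabL dp i (List.range' 1 (min (otMaxLen vocabL) i))
            (dp.getD i none, par.getD i 0)).1,
         par.set i (otAccA cs vocabL dp i (List.range' 1 (min (otMaxLen vocabL) i))
            (dp.getD i none, par.getD i 0)).2) := by
    conv_lhs => rw [← set_getD_self' dp i none hdp, ← set_getD_self' par i 0 hpar]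
    exact otA_inner_set cs vocabL i hi _ hLs dp par hdp (dp.getD i none) (par.getD i 0)
  have hacc := otB_scan_eq_accA cs vocabL best dp i (par.getD i 0) hi hin hread i 0 none
    (by omega) (by omega)
  simp only [Nat.sub_zero, List.take_zero, otToSt] at hacc
  rw [hnone] at hinner
  rw [hacc] at hinner
  cases hch : otB_scan cs vocabL (otSuffixes vocabL) best i (List.range' 1 i) [] none with
  | none =>
    rw [hch] at hinner
    refine ⟨(best.getD (i - 1) (0, [])).1 + 1, i - 1, by omega, ?_, ?_⟩
    · simp only [otA_step, hinner]
      rw [getD_set_ne' _ _ _ _ _ (by omega : i - 1 ≠ i), getD_set_self' _ _ _ _ hdp,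
        hread (i - 1) (by omega)]
      simp [otInfLt, otInfAdd1, List.set_set]
    · simp only [otB_step, hch]
  | some q =>
    rw [hch] at hinner
    have hq2 : q.2 < i := otB_scan_snd_lt cs vocabL (otSuffixes vocabL) best i hi _ _ _
      (fun L hL => by rw [List.mem_range'_1] at hL; omega) (by simp) q hch
    by_cases hfc : (best[i - 1]?.getD (0, [])).1 + 1 < q.1
    · refine ⟨(best.getD (i - 1) (0, [])).1 + 1, i - 1, by omega, ?_, ?_⟩
      · simp only [otA_step, hinner]
        rw [getD_set_ne' _ _ _ _ _ (by omega : i - 1 ≠ i), getD_set_self' _ _ _ _ hdp,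
          hread (i - 1) (by omega)]
        simp [otInfLt, otInfAdd1, List.set_set, hfc]
      · simp only [otB_step, hch]
        simp [hfc]
    · refine ⟨q.1, q.2, hq2, ?_, ?_⟩
      · simp only [otA_step, hinner]
        rw [getD_set_ne' _ _ _ _ _ (by omega : i - 1 ≠ i), getD_set_self' _ _ _ _ hdp,
          hread (i - 1) (by omega)]
        simp [otInfLt, otInfAdd1, hfc]
      · simp only [otB_step, hch]
        simp [hfc]

-- the outer-loop invariant tying A's (dp, parent) to B's best list
theorem otOuter_inv (cs : List Char) (vocabL : List (List Char)) (m : Nat) (hm : m ≤ cs.length) :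
    ∀ stA bs, stA = (List.range' 1 m).foldl (otA_step cs vocabL)
        (some 0 :: List.replicate cs.length none, List.replicate (cs.length + 1) 0) →
      bs = (List.range' 1 m).foldl (otB_step cs vocabL (otSuffixes vocabL))
        [((0 : Int), ([] : List (List Char)))] →
      stA.1.length = cs.length + 1 ∧ stA.2.length = cs.length + 1 ∧ bs.length = m + 1 ∧
      (∀ k, k ≤ m → stA.1.getD k none = some ((bs.getD k (0, [])).1)) ∧
      (∀ k, m < k → stA.1.getD k none = none) ∧
      bs.getD 0 (0, []) = (0, []) ∧
      (∀ k, 1 ≤ k → k ≤ m → stA.2.getD k 0 < k ∧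
        (bs.getD k (0, [])).2 = ((cs.drop (stA.2.getD k 0)).take (k - stA.2.getD k 0))
          :: (bs.getD (stA.2.getD k 0) (0, [])).2) := by
  induction m with
  | zero =>
    intro stA bs hA hB
    subst hA hB
    simp only [List.range'_zero, List.foldl_nil]
    refine ⟨by simp, by simp, by simp, ?_, ?_, by simp, by omega⟩
    · intro k hk
      interval_cases k
      simp
    · intro k hk
      match k, hk with
      | (k+1), _ =>
        simp [List.getD_eq_getElem?_getD, List.getElem?_replicate]
        split <;> rfl
  | succ m ih =>
    intro stA bs hA hB
    have hmn : m ≤ cs.length := by omega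
    obtain ⟨h1, h2, h3, h4, h5, h6, h7⟩ := ih hmn _ _ rfl rfl
    have hrng : List.range' 1 (m+1) = List.range' 1 m ++ [m+1] := by
      have := List.range'_concat (s := 1) (n := m) (step := 1)
      simpa [Nat.add_comm] using this
    set dp := ((List.range' 1 m).foldl (otA_step cs vocabL)
      (some 0 :: List.replicate cs.length none, List.replicate (cs.length + 1) 0)).1 with hdp_def
    set par := ((List.range' 1 m).foldl (otA_step cs vocabL)
      (some 0 :: List.replicate cs.length none, List.replicate (cs.length + 1) 0)).2 with hpar_def
    set bsm := (List.range' 1 m).foldl (otB_step cs vocabL (otSuffixes vocabL))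
      [((0 : Int), ([] : List (List Char)))] with hbsm_def
    obtain ⟨c, j, hj, hAstep, hBstep⟩ := otStep_eq cs vocabL (m+1) dp par bsm
      (by omega) (by omega) (by omega) (by omega) (h5 (m+1) (by omega))
      (fun j hj => h4 j (by omega))
    subst hA hB
    simp only [hrng, List.foldl_append, List.foldl_cons, List.foldl_nil]
    have hpair : (List.range' 1 m).foldl (otA_step cs vocabL)
        (some 0 :: List.replicate cs.length none, List.replicate (cs.length + 1) 0) = (dp, par) := rfl
    rw [hpair, ← hbsm_def, hAstep, hBstep]
    refine ⟨by simpa using h1, by simpa using h2, by simp [h3], ?_, ?_, ?_, ?_⟩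
    · intro k hk
      rcases Nat.lt_or_ge k (m+1) with hk' | hk'
      · rw [getD_set_ne' _ _ _ _ _ (by omega), getD_append_left' _ _ _ _ (by omega),
          h4 k (by omega)]
      · have hkk : k = m + 1 := by omega
        subst hkk
        rw [getD_set_self' _ _ _ _ (by omega), show m + 1 = bsm.length from by omega,
          getD_concat_length']
    · intro k hk
      rw [getD_set_ne' _ _ _ _ _ (by omega)]
      exact h5 k (by omega)
    · rw [getD_append_left' _ _ _ _ (by omega)]
      exact h6
    · intro k hk1 hk2
      rcases Nat.lt_or_ge k (m+1) with hk' | hk'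
      · have h7k := h7 k hk1 (by omega)
        rw [getD_set_ne' _ _ _ _ _ (by omega), getD_append_left' _ _ _ _ (by omega),
          getD_append_left' _ _ _ _ (by omega)]
        exact ⟨h7k.1, h7k.2⟩
      · have hkk : k = m + 1 := by omega
        subst hkk
        rw [getD_set_self' _ _ _ _ (by omega)]
        refine ⟨hj, ?_⟩
        rw [show m + 1 = bsm.length from by omega, getD_concat_length',
          getD_append_left' _ _ _ _ (by omega)]

theorem otBuild_eq (cs : List Char) (par : List Nat) (bs : List (Int × List (List Char)))
    (hz : (bs.getD 0 (0, [])).2 = [])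
    (hstep : ∀ k, 1 ≤ k → k ≤ cs.length → par.getD k 0 < k ∧
      (bs.getD k (0, [])).2 = ((cs.drop (par.getD k 0)).take (k - par.getD k 0))
        :: (bs.getD (par.getD k 0) (0, [])).2) :
    ∀ fuel pos acc, pos < fuel → pos ≤ cs.length →
      otA_build cs par fuel pos acc = acc ++ (bs.getD pos (0, [])).2 := by
  intro fuel
  induction fuel with
  | zero => intro pos acc h _; omega
  | succ fuel ih =>
    intro pos acc hf hp
    match pos, hp with
    | 0, _ =>
      simp only [otA_build]
      rw [if_neg (by omega : ¬ (0:Nat) < 0), hz]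
      simp
    | (p+1), hp =>
      obtain ⟨hlt, heq⟩ := hstep (p+1) (by omega) hp
      simp only [otA_build, if_pos (Nat.succ_pos p)]
      rw [ih _ _ (by omega) (by omega), heq, List.append_assoc]
      simp

-- ===== VERDICT (by name: the statement is the Claim_ definition above) =====
theorem optimal_tokenize_spec : Claim_equal_optimal_tokenize := by
  intro text vocab _
  unfold Spec_optimal_tokenize
  simp only [optimal_tokenize, optimal_tokenize_alt]
  by_cases hcs : text.toList = []
  · simp [hcs, List.range'_zero]
  · rw [if_neg hcs]
    obtain ⟨h1, h2, h3, h4, h5, h6, h7⟩ :=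
      otOuter_inv text.toList (vocab.map String.toList) text.toList.length le_rfl _ _ rfl rfl
    rw [otBuild_eq text.toList
      ((List.range' 1 text.toList.length).foldl (otA_step text.toList (vocab.map String.toList))
        (some 0 :: List.replicate text.toList.length none,
         List.replicate (text.toList.length + 1) 0)).2
      ((List.range' 1 text.toList.length).foldl
        (otB_step text.toList (vocab.map String.toList) (otSuffixes (vocab.map String.toList)))
        [((0 : Int), ([] : List (List Char)))])
      (by rw [h6]) (fun k hk1 hk2 => h7 k hk1 hk2)
      (text.toList.length + 1) text.toList.length [] (by omega) le_rfl]
    simp
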